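-- pv_equiv track=rewrite | github.com/tgyuuAn/Algorithm | Babbling2_python.py | solution
-- ===== SOURCE A (Python) =====
-- from itertools import permutations
--
-- def solution(babbling):
--     speak = ["aya", "ye", "woo", "ma"]
--     answer = 0
--     can_speak = []
--
--     for x in range(1,5):
--         for word_list in permutations(speak,x):
--             temp = ""
--             for word in word_list:
--                 temp+=word
--             can_speak.append(temp)
--
--     for bab in babbling:
--         if bab in can_speak:
--             answer += 1
--     return answer
-- ===== SOURCE B (Python) =====
-- def solution(babbling):
--     count = 0
--     for bab in babbling:
--         rest = bab
--         rem = ["aya", "ye", "woo", "ma"]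
--         while rest:
--             for w in rem:
--                 if rest.startswith(w):
--                     rem.remove(w)
--                     rest = rest[len(w):]
--                     break
--             else:
--                 break
--         if not rest and bab:
--             count += 1
--     return count
-- ===== Notes on version B (the rewrite author's own statement) =====
-- stated objective: alternative
-- what changed: Replaces A's precomputed table of all 64 permutation-concatenations (and a linear scan of it per babbling) by a direct deterministic greedy left-to-right parse of each babbling with a used-word set, accepting iff the whole string is consumed and nonempty.
import Mathlib
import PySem

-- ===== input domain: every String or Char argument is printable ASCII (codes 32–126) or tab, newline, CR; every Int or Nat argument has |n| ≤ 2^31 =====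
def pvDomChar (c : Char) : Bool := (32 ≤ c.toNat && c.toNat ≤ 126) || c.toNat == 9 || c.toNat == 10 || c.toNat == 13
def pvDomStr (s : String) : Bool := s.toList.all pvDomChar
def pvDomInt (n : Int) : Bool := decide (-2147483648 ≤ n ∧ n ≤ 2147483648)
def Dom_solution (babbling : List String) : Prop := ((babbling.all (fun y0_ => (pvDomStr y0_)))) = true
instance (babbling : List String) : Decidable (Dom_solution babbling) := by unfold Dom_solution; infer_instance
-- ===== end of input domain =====

-- B replaces A's precomputed 64-entry permutation table by a direct greedy left-to-right
-- parse of each babbling (the four words start with distinct letters, so the parse is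
-- deterministic); objective: alternative algorithm, O(1) extra space instead of the table.

-- ===== PORT A =====
-- itertools.permutations(pool, r) for a pool of DISTINCT elements, in itertools order
def permsA : List String → Nat → List (List String)
  | _, 0 => [[]]
  | pool, Nat.succ r => pool.flatMap (fun w => (permsA (pool.erase w) r).map (w :: ·))

-- the can_speak table A builds (x runs over range(1,5); its values are nonnegative, so .toNat is exact)
def canSpeakA : List String :=
  (PySem.List.pyRange 1 5 1).foldl
    (fun acc x => acc ++ (permsA ["aya", "ye", "woo", "ma"] x.toNat).map
      (fun wordList => wordList.foldl (fun temp word => temp ++ word) "")) []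

def solution (babbling : List String) : Int :=
  babbling.foldl (fun answer bab => if canSpeakA.contains bab then answer + 1 else answer) 0

-- ===== PORT B =====
-- the while-loop of Source B: consume one not-yet-used word that prefixes the rest, until the
-- rest is empty (true) or no word matches (false); the fuel argument (initially the number
-- of words) only guards totality — each iteration removes one word from rem.
def greedyGo : Nat → List Char → List String → Bool
  | _, [], _ => true
  | 0, _, _ => false
  | Nat.succ n, cs, rem =>
    match rem.find? (fun w => PySem.Chars.startswith cs w.toList) with
    | none => false
    | some w => greedyGo n (cs.drop w.toList.length) (rem.erase w)

-- 'not rest and bab' after the loop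
def babOkB (bab : String) : Bool :=
  greedyGo 4 bab.toList ["aya", "ye", "woo", "ma"] && !bab.toList.isEmpty

def solution_alt (babbling : List String) : Int :=
  babbling.foldl (fun count bab => if babOkB bab then count + 1 else count) 0

-- ===== PRECONDITION & SPEC =====
def Spec_solution (babbling : List String) (out : Int) : Prop := out = solution_alt babbling
instance (babbling : List String) (out : Int) : Decidable (Spec_solution babbling out) := by unfold Spec_solution; infer_instance

-- ===== CLAIM (what is proved, stated in full; the proofs are below) =====
def Claim_equal_solution : Prop := ∀ (babbling : List String), Dom_solution babbling → Spec_solution babbling (solution babbling)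

-- ===== LEMMAS AND PROOFS =====

-- all strings parseable with fuel n and remaining words rem (including the empty one)
def tblC : Nat → List String → List (List Char)
  | 0, _ => [[]]
  | Nat.succ n, rem => [] :: rem.flatMap (fun w => (tblC n (rem.erase w)).map (w.toList ++ ·))

theorem greedy_sound (n : Nat) (cs : List Char) (rem : List String)
    (h : greedyGo n cs rem = true) : cs ∈ tblC n rem := by
  induction n generalizing cs rem with
  | zero =>
    cases cs with
    | nil => simp [tblC]
    | cons c cs => simp [greedyGo] at h
  | succ n ih =>
    cases cs with
    | nil => simp [tblC]
    | cons c cs =>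
      rw [greedyGo.eq_def] at h
      simp only [] at h -- reduce the fuel/cons match to its third arm
      cases hf : List.find? (fun w => PySem.Chars.startswith (c :: cs) w.toList) rem with
      | none => rw [hf] at h; exact absurd h (by simp)
      | some w =>
        rw [hf] at h
        have hw : w ∈ rem := List.mem_of_find?_eq_some hf
        have hp : w.toList <+: (c :: cs) := by
          have := List.find?_some hf
          exact (PySem.Chars.startswith_iff _ _).mp this
        have hcs : w.toList ++ (c :: cs).drop w.toList.length = c :: cs := by
          obtain ⟨t, ht⟩ := hp
          rw [← ht, List.drop_left]
        have hm := ih _ _ h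
        rw [tblC]
        refine List.mem_cons_of_mem _ ?_
        rw [List.mem_flatMap]
        exact ⟨w, hw, by rw [List.mem_map]; exact ⟨_, hm, hcs⟩⟩

-- every entry of A's table passes B's check (64 concrete strings)
theorem table_ok : canSpeakA.all babOkB = true := by decide

-- every nonempty greedily parseable string is in A's table (65 concrete char lists)
theorem parse_in_table :
    (tblC 4 ["aya", "ye", "woo", "ma"]).all
      (fun cs => cs.isEmpty || canSpeakA.contains (String.ofList cs)) = true := by decide

theorem contains_eq_babOkB (bab : String) : canSpeakA.contains bab = babOkB bab := by
  by_cases hA : bab ∈ canSpeakA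
  · have := (List.all_eq_true.mp table_ok) bab hA
    simp only [List.contains_eq_mem, hA, decide_true, this]
  · simp only [List.contains_eq_mem, hA, decide_false]
    cases hB : babOkB bab with
    | false => rfl
    | true =>
      exfalso
      simp only [babOkB, Bool.and_eq_true, Bool.not_eq_true'] at hB
      obtain ⟨hg, hne⟩ := hB
      have hmem := greedy_sound 4 bab.toList ["aya", "ye", "woo", "ma"] hg
      have := (List.all_eq_true.mp parse_in_table) _ hmem
      rw [hne] at this
      simp only [Bool.false_or, List.contains_eq_mem, decide_eq_true_eq] at this
      rw [String.ofList_toList] at this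
      exact hA this

theorem folds_eq (babbling : List String) :
    solution babbling = solution_alt babbling := by
  unfold solution solution_alt
  have : (fun (answer : Int) (bab : String) => if canSpeakA.contains bab then answer + 1 else answer)
       = (fun (count : Int) (bab : String) => if babOkB bab then count + 1 else count) := by
    funext a b; rw [contains_eq_babOkB]
  rw [this]

-- ===== VERDICT (by name: the statement is the Claim_ definition above) =====
theorem solution_spec : Claim_equal_solution := by
  intro babbling _
  unfold Spec_solution
  exact folds_eq babbling
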